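-- pv_equiv track=rewrite | github.com/EcodylicScience/mosaic | src/mosaic/behavior/feature_library/movement/convert.py | _pose_column_pairs
-- ===== SOURCE A (Python) =====
-- def _pose_column_pairs(columns) -> list[tuple[str, str]]:
--     """Extract (poseX*, poseY*) column pairs from column names."""
--     pose_pairs = []
--     xs = [c for c in columns if c.startswith("poseX")]
--     for x_col in sorted(xs):
--         idx = x_col[5:]
--         y_col = f"poseY{idx}"
--         if y_col in columns:
--             pose_pairs.append((x_col, y_col))
--     return pose_pairs
-- ===== SOURCE B (Python) =====
-- def _pose_column_pairs(columns) -> list[tuple[str, str]]: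
--     """Extract (poseX*, poseY*) column pairs from column names."""
--     xs = sorted(c[5:] for c in columns if c.startswith("poseX"))
--     ys = sorted({c[5:] for c in columns if c.startswith("poseY")})
--     pairs = []
--     i = j = 0
--     while i < len(xs) and j < len(ys):
--         if xs[i] < ys[j]:
--             i += 1
--         elif ys[j] < xs[i]:
--             j += 1
--         else:
--             pairs.append(("poseX" + xs[i], "poseY" + xs[i]))
--             i += 1
--     return pairs
-- ===== Notes on version B (the rewrite author's own statement) =====
-- stated objective: alternative
-- what changed: B replaces A's sort-then-probe (membership scan of the whole column list per poseX column) by a sort-merge join: it sorts the poseX suffixes and the distinct poseY suffixes and merges them with two pointers, emitting a pair at each match.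
import Mathlib
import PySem

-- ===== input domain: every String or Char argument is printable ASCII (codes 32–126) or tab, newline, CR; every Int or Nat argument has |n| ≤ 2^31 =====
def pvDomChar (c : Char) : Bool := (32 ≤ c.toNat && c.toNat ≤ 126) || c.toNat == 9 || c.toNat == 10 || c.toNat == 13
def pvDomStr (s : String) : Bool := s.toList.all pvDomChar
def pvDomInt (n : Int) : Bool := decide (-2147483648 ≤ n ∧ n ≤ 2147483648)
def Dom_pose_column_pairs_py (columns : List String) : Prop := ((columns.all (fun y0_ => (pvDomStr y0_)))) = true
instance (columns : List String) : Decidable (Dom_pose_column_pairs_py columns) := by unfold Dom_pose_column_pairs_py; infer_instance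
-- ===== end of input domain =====

-- B replaces A's sort-then-probe (a membership scan of the whole column list for each sorted
-- poseX column) by a sort-merge join of the sorted poseX suffixes with the sorted distinct
-- poseY suffixes, advancing two pointers and emitting one pair per match.

-- ===== PORT A =====
def pose_column_pairs_py (columns : List String) : List (String × String) :=
  let xs := columns.filter (fun c => PySem.Str.startswith c "poseX")
  (PySem.List.sorted xs (fun x => x)).foldl
    (fun pose_pairs x_col =>
      let idx := PySem.Str.slice x_col (some 5) none
      let y_col := "poseY" ++ idx
      if columns.contains y_col then pose_pairs ++ [(x_col, y_col)] else pose_pairs) []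

-- ===== PORT B =====
-- Source B's two-pointer while loop over the two sorted lists, transcribed as the obvious
-- recursion consuming the head at whichever side the pointer advances.
def pvMerge : List String → List String → List (String × String)
  | [], _ => []
  | _ :: _, [] => []
  | x :: xs, y :: ys =>
    if x < y then pvMerge xs (y :: ys)
    else if y < x then pvMerge (x :: xs) ys
    else ("poseX" ++ x, "poseY" ++ x) :: pvMerge xs (y :: ys)
termination_by xs ys => xs.length + ys.length
decreasing_by all_goals simp

def pose_column_pairs_py_alt (columns : List String) : List (String × String) :=
  let xs := PySem.List.sorted
    ((columns.filter (fun c => PySem.Str.startswith c "poseX")).map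
      (fun c => PySem.Str.slice c (some 5) none)) (fun s => s)
  let ys := PySem.List.sorted
    (PySem.Set.ofList ((columns.filter (fun c => PySem.Str.startswith c "poseY")).map
      (fun c => PySem.Str.slice c (some 5) none))) (fun s => s)
  pvMerge xs ys

-- ===== PRECONDITION & SPEC =====
def Spec_pose_column_pairs_py (columns : List String) (out : List (String × String)) : Prop := out = pose_column_pairs_py_alt columns
instance (columns : List String) (out : List (String × String)) : Decidable (Spec_pose_column_pairs_py columns out) := by unfold Spec_pose_column_pairs_py; infer_instance

-- ===== CLAIM (what is proved, stated in full; the proofs are below) =====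
def Claim_equal_pose_column_pairs_py : Prop := ∀ (columns : List String), Dom_pose_column_pairs_py columns → Spec_pose_column_pairs_py columns (pose_column_pairs_py columns)

-- ===== LEMMAS AND PROOFS =====

-- the suffix c[5:], used only by the proofs
def pvSuf (c : String) : String := PySem.Str.slice c (some 5) none

theorem pvSuf_def (c : String) : PySem.Str.slice c (some 5) none = pvSuf c := rfl

theorem pvStr_ext {s t : String} (h : s.toList = t.toList) : s = t := by
  have := congrArg String.ofList h
  simpa using this

theorem pvToList_suf (c : String) : (pvSuf c).toList = c.toList.drop 5 := by
  rw [pvSuf, PySem.Str.toList_slice, PySem.Chars.slice_eq_listSlice,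
    PySem.List.slice_from _ (by norm_num)]
  rfl

theorem pvStartswith_iff (c p : String) :
    PySem.Str.startswith c p = true ↔ p.toList <+: c.toList := by
  rw [PySem.Str.startswith_eq]
  exact PySem.Chars.startswith_iff _ _

theorem pvEq_append_suf {p c : String} (hp : p.toList.length = 5)
    (h : PySem.Str.startswith c p = true) : c = p ++ pvSuf c := by
  rcases (pvStartswith_iff c p).1 h with ⟨t, ht⟩
  apply pvStr_ext
  rw [String.toList_append, pvToList_suf, ← ht, ← hp, List.drop_left]

theorem pvSuf_append {p : String} (hp : p.toList.length = 5) (s : String) :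
    pvSuf (p ++ s) = s := by
  apply pvStr_ext
  rw [pvToList_suf, String.toList_append, ← hp, List.drop_left]

theorem pvLen_poseX : "poseX".toList.length = 5 := by decide
theorem pvLen_poseY : "poseY".toList.length = 5 := by decide

theorem pvStartswith_append (p s : String) : PySem.Str.startswith (p ++ s) p = true := by
  rw [pvStartswith_iff, String.toList_append]
  exact List.prefix_append _ _

theorem pvList_append_lt_append_left (p a b : List Char) : p ++ a < p ++ b ↔ a < b := by
  induction p with
  | nil => simp
  | cons x p ih => simpa [List.cons_lt_cons_iff] using ih

theorem pvString_append_lt {s t : String} (p : String) (h : s < t) : p ++ s < p ++ t := by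
  rw [String.lt_iff_toList_lt] at h ⊢
  rw [String.toList_append, String.toList_append]
  exact (pvList_append_lt_append_left _ _ _).2 h

theorem pvString_append_le {s t : String} (p : String) (h : s ≤ t) : p ++ s ≤ p ++ t := by
  rcases eq_or_lt_of_le h with he | hl
  · exact le_of_eq (by rw [he])
  · exact le_of_lt (pvString_append_lt p hl)

theorem pvBool_eq {a b : Bool} (h : a = true ↔ b = true) : a = b := by
  cases a <;> cases b <;> simp_all

-- the sort-merge join equals "filter the sorted left side by membership on the right",
-- when the left side is weakly sorted and the right side strictly sorted
theorem pvMerge_eq : ∀ (xs ys : List String), xs.Pairwise (· ≤ ·) → ys.Pairwise (· < ·) →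
    pvMerge xs ys
      = (xs.filter (fun s => ys.contains s)).map (fun s => ("poseX" ++ s, "poseY" ++ s))
  | [], ys, _, _ => by simp [pvMerge]
  | x :: xs, [], _, _ => by simp [pvMerge]
  | x :: xs, y :: ys, hx, hy => by
    rw [pvMerge]
    by_cases h1 : x < y
    · rw [if_pos h1]
      have hnotmem : x ∉ y :: ys := by
        intro hm
        rcases List.mem_cons.1 hm with h | h
        · exact absurd h (ne_of_lt h1)
        · exact absurd ((List.pairwise_cons.1 hy).1 x h) (lt_asymm h1)
      rw [List.filter_cons_of_neg (by simpa [List.contains_iff_mem] using hnotmem)]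
      exact pvMerge_eq xs (y :: ys) (List.pairwise_cons.1 hx).2 hy
    · rw [if_neg h1]
      by_cases h2 : y < x
      · rw [if_pos h2]
        have hcong : (x :: xs).filter (fun s => (y :: ys).contains s)
            = (x :: xs).filter (fun s => ys.contains s) := by
          refine List.filter_congr ?_
          intro z hz
          have hxz : x ≤ z := by
            rcases List.mem_cons.1 hz with h | h
            · exact le_of_eq h.symm
            · exact (List.pairwise_cons.1 hx).1 z h
          have hne : (z == y) = false :=
            beq_eq_false_iff_ne.2 (ne_of_gt (lt_of_lt_of_le h2 hxz))
          rw [List.contains_cons, hne, Bool.false_or]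
        rw [hcong]
        exact pvMerge_eq (x :: xs) ys hx (List.pairwise_cons.1 hy).2
      · rw [if_neg h2]
        have hxy : x = y := le_antisymm (not_lt.1 h2) (not_lt.1 h1)
        have hmem : (y :: ys).contains x = true := by
          rw [List.contains_cons, hxy]
          simp
        rw [List.filter_cons_of_pos hmem, List.map_cons]
        rw [pvMerge_eq xs (y :: ys) (List.pairwise_cons.1 hx).2 hy]
termination_by xs ys => xs.length + ys.length
decreasing_by all_goals simp

-- ===== VERDICT (by name: the statement is the Claim_ definition above) =====
theorem pose_column_pairs_py_spec : Claim_equal_pose_column_pairs_py := by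
  intro columns _hdom
  unfold Spec_pose_column_pairs_py
  set xl := columns.filter (fun c => PySem.Str.startswith c "poseX") with hxl
  have hXmem : ∀ c ∈ xl, c = "poseX" ++ pvSuf c := by
    intro c hc
    exact pvEq_append_suf pvLen_poseX (List.mem_filter.1 hc).2
  -- the sorted suffix lists B merges
  set S := PySem.List.sorted (xl.map pvSuf) (fun s => s) with hS
  set Y := PySem.List.sorted
    (PySem.Set.ofList ((columns.filter (fun c => PySem.Str.startswith c "poseY")).map pvSuf))
    (fun s => s) with hY
  have hSpw : S.Pairwise (· ≤ ·) := by
    have := PySem.List.sorted_pairwise (xl.map pvSuf) (fun s => s)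
    simpa using this
  have hYpw : Y.Pairwise (· < ·) := PySem.List.sorted_ofList_pairwise_lt _
  -- A's sorted poseX column list is the sorted suffix list with the prefix re-attached
  have hsorted : PySem.List.sorted xl (fun x => x) = S.map (fun s => "poseX" ++ s) := by
    refine PySem.List.sorted_id_eq_of_perm_of_pairwise _ _ ?_ ?_
    · have h1 : (S.map (fun s => "poseX" ++ s)).Perm
          ((xl.map pvSuf).map (fun s => "poseX" ++ s)) :=
        (PySem.List.sorted_perm _ _ _).map _
      have h2 : (xl.map pvSuf).map (fun s => "poseX" ++ s) = xl := by
        rw [List.map_map]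
        calc xl.map (fun c => "poseX" ++ pvSuf c)
            = xl.map (fun c => c) := List.map_congr_left (fun c hc => (hXmem c hc).symm)
          _ = xl := List.map_id _
      rw [h2] at h1
      exact h1
    · exact hSpw.map _ (fun _ _ h => pvString_append_le _ h)
  -- Y-membership of a suffix = membership of the rebuilt poseY name in columns
  have hcondIff : ∀ s, Y.contains s = true ↔ columns.contains ("poseY" ++ s) = true := by
    intro s
    rw [List.contains_iff_mem, hY, PySem.List.mem_sorted, PySem.Set.mem_ofList,
      List.contains_iff_mem]
    constructor
    · intro h
      rcases List.mem_map.1 h with ⟨c, hcf, hcs⟩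
      rcases List.mem_filter.1 hcf with ⟨hccol, hcsw⟩
      have : c = "poseY" ++ s := by
        rw [← hcs]
        exact pvEq_append_suf pvLen_poseY hcsw
      rw [← this]
      exact hccol
    · intro h
      refine List.mem_map.2 ⟨"poseY" ++ s, ?_, pvSuf_append pvLen_poseY s⟩
      exact List.mem_filter.2 ⟨h, pvStartswith_append _ _⟩
  -- reduce port A to a filter-map over S
  have hA : pose_column_pairs_py columns
      = (S.filter (fun s => columns.contains ("poseY" ++ s))).map
          (fun s => ("poseX" ++ s, "poseY" ++ s)) := by
    rw [pose_column_pairs_py]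
    simp only [pvSuf_def, ← hxl]
    rw [PySem.List.foldl_append_if (fun x => columns.contains ("poseY" ++ pvSuf x))
      (fun x => (x, "poseY" ++ pvSuf x))]
    rw [List.nil_append, hsorted, List.filter_map, List.map_map]
    simp only [Function.comp_def, pvSuf_append pvLen_poseX]
  -- reduce port B via the merge lemma
  have hB : pose_column_pairs_py_alt columns
      = (S.filter (fun s => columns.contains ("poseY" ++ s))).map
          (fun s => ("poseX" ++ s, "poseY" ++ s)) := by
    rw [pose_column_pairs_py_alt]
    simp only [pvSuf_def, ← hxl, ← hS, ← hY]
    rw [pvMerge_eq S Y hSpw hYpw]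
    congr 1
    refine List.filter_congr ?_
    intro s _
    exact pvBool_eq (hcondIff s)
  rw [hA, hB]
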